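-- pv_equiv track=rewrite | github.com/lucliu20/LeetCode-Medium | 1338-Reduce Array Size to The Half.py | minSetSize
-- ===== SOURCE A (Python) =====
-- from typing import List
-- import heapq
-- import collections
--
-- def minSetSize(arr: List[int]) -> int:
--     res, freq = 0, collections.defaultdict(int)
--     heap, count = [], collections.Counter(arr)
--     for _, v in count.items():
--         freq[v] += 1
--     for k, v in freq.items():
--         heapq.heappush(heap, [-k,v])
--     half = len(arr) // 2
--     while half > 0:
--         if -(heap[0][0]) >= half:
--             res += 1
--             break
--         else:
--             res += 1
--             if (half + heap[0][0]) in freq: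
--                 half += heap[0][0]
--                 if heap[0][1] > 0:
--                     heap[0][1] -= 1
--             else:
--                 half += heap[0][0]
--                 if heap[0][1] > 0:
--                     heap[0][1] -= 1
--         if heap[0][1] == 0:
--             heapq.heappop(heap)
--     return res
-- ===== SOURCE B (Python) =====
-- from typing import List
-- import collections
--
-- def minSetSize(arr: List[int]) -> int:
--     n = len(arr)
--     counts = collections.Counter(arr)
--     bucket = [0] * (n + 1)
--     for v in counts.values():
--         bucket[v] += 1
--     need = n // 2
--     res = 0
--     for c in range(n, 0, -1):
--         if need <= 0:
--             break
--         take = min(bucket[c], -(-need // c))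
--         res += take
--         need -= take * c
--     return res
-- ===== Notes on version B (the rewrite author's own statement) =====
-- stated objective: alternative
-- what changed: Replaces the heap of (negated frequency, multiplicity) pairs popped one-by-one with a bucket array indexed by frequency and a single high-to-low sweep that takes whole buckets at once via ceiling division.
import Mathlib
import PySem

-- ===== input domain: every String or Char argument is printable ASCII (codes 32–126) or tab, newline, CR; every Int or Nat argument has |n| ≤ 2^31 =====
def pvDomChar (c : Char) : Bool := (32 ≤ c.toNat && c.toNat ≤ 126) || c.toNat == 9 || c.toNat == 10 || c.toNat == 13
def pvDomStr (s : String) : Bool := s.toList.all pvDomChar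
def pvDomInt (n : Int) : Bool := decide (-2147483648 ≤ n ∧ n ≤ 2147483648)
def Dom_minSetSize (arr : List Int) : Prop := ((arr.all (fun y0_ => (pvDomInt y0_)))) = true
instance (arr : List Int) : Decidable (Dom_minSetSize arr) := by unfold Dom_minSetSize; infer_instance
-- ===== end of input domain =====

-- B replaces A's heap-of-frequencies greedy by a bucket count indexed by frequency with a single
-- high-to-low arithmetic sweep (alternative algorithm; not measured faster).

-- ===== PORT A =====
-- A's heap holds pairs (-count, multiplicity); Python compares the two-element lists [-k, v]
-- lexicographically, which is exactly the `Lex (Int × Int)` order on the pairs.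
def pairKey (p : Int × Int) : Lex (Int × Int) := toLex p

-- heapq.heappush / heappop are standard-library calls; they are ported as a sorted-list priority
-- queue with the same observable semantics (heap[0] is the lex-least element, heappop removes it,
-- the heap's multiset of elements is preserved).  minSetSize reads the heap only through heap[0]
-- and the multiset of its elements, so this port is exact for minSetSize on every input.
def heappush (heap : List (Int × Int)) (item : Int × Int) : List (Int × Int) :=
  PySem.List.insertBy (fun a b => decide (pairKey a < pairKey b)) item heap

-- fuel bound for the while loop: every non-breaking iteration removes one unit of multiplicity,
-- so `totalMult heap + 1` steps always suffice (the fuel only makes the loop total)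
def totalMult (heap : List (Int × Int)) : Nat := (heap.map (fun p => p.2.toNat)).sum

-- the while loop of A; `heap = []` is where Python would raise IndexError (unreachable from
-- minSetSize, whose heap always carries total multiplicity ≥ anything the loop can consume)
def loopA : Nat → List (Int × Int) → PySem.Dict Int Int → Int → Int → Int
  | 0, _, _, _, res => res
  | fuel + 1, heap, freq, half, res =>
    if 0 < half then
      match heap with
      | [] => res
      | (a, b) :: t =>
        if half ≤ -a then res + 1
        else
          let res' := res + 1
          let st :=
            if freq.contains (half + a) then
              (half + a, if 0 < b then (a, b - 1) :: t else (a, b) :: t)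
            else
              (half + a, if 0 < b then (a, b - 1) :: t else (a, b) :: t)
          let heap' :=
            match st.2 with
            | [] => []
            | (a', b') :: t' => if b' == 0 then t' else (a', b') :: t'
          loopA fuel heap' freq st.1 res'
    else res

def minSetSize (arr : List Int) : Int :=
  let count := PySem.Dict.counter arr
  let freq := count.items.foldl (fun d kv => d.modify kv.2 0 (· + 1))
      (PySem.Dict.empty : PySem.Dict Int Int)
  let heap := freq.items.foldl (fun h kv => heappush h (-kv.1, kv.2)) []
  let half := PySem.Int.floordiv (arr.length : Int) 2
  loopA (totalMult heap + 1) heap freq half 0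

-- ===== PORT B =====
-- for c in range(n, 0, -1): if need <= 0: break; take = min(bucket[c], -(-need // c)); ...
def sweep (bucket : List Int) : List Int → Int → Int → Int
  | [], _, res => res
  | c :: cs, need, res =>
    if need ≤ 0 then res
    else
      let take := min (PySem.List.pyGetD bucket c 0) (-(PySem.Int.floordiv (-need) c))
      sweep bucket cs (need - take * c) (res + take)

def minSetSize_alt (arr : List Int) : Int :=
  let n := arr.length
  let counts := PySem.Dict.counter arr
  let bucket := counts.values.foldl
      (fun b v => PySem.List.pySetD b v (PySem.List.pyGetD b v 0 + 1))
      (List.replicate (n + 1) 0)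
  sweep bucket (PySem.List.pyRange (n : Int) 0 (-1)) (PySem.Int.floordiv (n : Int) 2) 0

-- ===== PRECONDITION & SPEC =====
def Spec_minSetSize (arr : List Int) (out : Int) : Prop := out = minSetSize_alt arr
instance (arr : List Int) (out : Int) : Decidable (Spec_minSetSize arr out) := by unfold Spec_minSetSize; infer_instance

-- ===== CLAIM (what is proved, stated in full; the proofs are below) =====
def Claim_equal_minSetSize : Prop := ∀ (arr : List Int), Dom_minSetSize arr → Spec_minSetSize arr (minSetSize arr)

-- ===== LEMMAS AND PROOFS =====

-- the common abstract computation: walk a list of frequencies, spending one removed set per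
-- element, until `need` is exhausted
def greedy : List Int → Int → Int
  | [], _ => 0
  | c :: t, need => if need ≤ 0 then 0 else 1 + greedy t (need - c)

-- the list of frequencies a heap of (-count, multiplicity) pairs stands for
def expandHeap (heap : List (Int × Int)) : List Int :=
  heap.flatMap (fun p => List.replicate p.2.toNat (-p.1))

lemma greedy_nonpos (L : List Int) (need : Int) (h : need ≤ 0) : greedy L need = 0 := by
  cases L <;> simp [greedy, h]

lemma greedy_cons (c : Int) (t : List Int) (need : Int) :
    greedy (c :: t) need = if need ≤ 0 then 0 else 1 + greedy t (need - c) := rfl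

lemma loopA_eq (fuel : Nat) : ∀ (heap : List (Int × Int)) (freq : PySem.Dict Int Int)
    (half res : Int), (∀ p ∈ heap, 1 ≤ p.2) → totalMult heap < fuel →
    loopA fuel heap freq half res = res + greedy (expandHeap heap) half := by
  induction fuel with
  | zero => intro heap freq half res _ hf; omega
  | succ fuel ih =>
    intro heap freq half res hmult hfuel
    match heap with
    | [] => simp [loopA, expandHeap, greedy]
    | (a, b) :: t =>
      have hb : 1 ≤ b := hmult (a, b) List.mem_cons_self
      have hexp : expandHeap ((a, b) :: t)
          = (-a) :: (List.replicate (b - 1).toNat (-a) ++ expandHeap t) := by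
        simp only [expandHeap, List.flatMap_cons]
        rw [show b.toNat = (b - 1).toNat + 1 by omega, List.replicate_succ]
        simp
      by_cases hhalf : 0 < half
      · by_cases hbrk : half ≤ -a
        · simp only [loopA, if_pos hhalf, if_pos hbrk]
          rw [hexp, greedy_cons, if_neg (show ¬(half ≤ 0) by omega),
            greedy_nonpos _ _ (by omega : half - -a ≤ 0)]
          ring
        · have hstep : loopA (fuel + 1) ((a, b) :: t) freq half res
              = loopA fuel (if (b - 1 == 0) = true then t else (a, b - 1) :: t) freq
                  (half + a) (res + 1) := by
            simp only [loopA, if_pos hhalf, if_neg hbrk, ite_self, if_pos (by omega : 0 < b)]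
          rw [hstep, hexp, greedy_cons, if_neg (show ¬(half ≤ 0) by omega), sub_neg_eq_add]
          by_cases hb1 : b = 1
          · subst hb1
            rw [if_pos (by simp : ((1 : Int) - 1 == 0) = true)]
            rw [ih t freq (half + a) (res + 1)
                (fun p hp => hmult p (List.mem_cons_of_mem _ hp))
                (by simp [totalMult] at hfuel ⊢; omega)]
            norm_num
            ring
          · rw [if_neg (by simp; omega : ¬(((b : Int) - 1 == 0) = true))]
            rw [ih ((a, b - 1) :: t) freq (half + a) (res + 1)
                (by
                  intro p hp
                  rcases List.mem_cons.mp hp with h | h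
                  · rw [h]; omega
                  · exact hmult p (List.mem_cons_of_mem _ h))
                (by simp [totalMult] at hfuel ⊢; omega)]
            rw [show expandHeap ((a, b - 1) :: t)
                  = List.replicate (b - 1).toNat (-a) ++ expandHeap t by
                simp [expandHeap]]
            ring
      · simp only [loopA, if_neg hhalf]
        rw [hexp, greedy_cons, if_pos (by omega : half ≤ 0)]
        ring

lemma ceil_pos {c need : Int} (hc : 1 ≤ c) (h : 0 < need) :
    1 ≤ -(PySem.Int.floordiv (-need) c) := by
  have h0 : (0 ≤ PySem.Int.floordiv (-need) c) ↔ (0 * c ≤ -need) :=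
    PySem.Int.le_floordiv_iff_mul_le (by omega)
  simp only [zero_mul] at h0
  omega

lemma ceil_eq_one {c need : Int} (hc : 1 ≤ c) (h1 : 0 < need) (h2 : need ≤ c) :
    -(PySem.Int.floordiv (-need) c) = 1 := by
  have h0 : (-1 ≤ PySem.Int.floordiv (-need) c) ↔ (-1 * c ≤ -need) :=
    PySem.Int.le_floordiv_iff_mul_le (by omega)
  have h3 := ceil_pos hc h1
  omega

lemma ceil_succ {c : Int} (hc : 1 ≤ c) (need : Int) :
    -(PySem.Int.floordiv (-need) c) = -(PySem.Int.floordiv (-(need - c)) c) + 1 := by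
  have hc0 : (0 : Int) < c := by omega
  rw [PySem.Int.floordiv_eq_ediv_of_pos hc0, PySem.Int.floordiv_eq_ediv_of_pos hc0]
  have h1 : (-(need - c)) = -need + 1 * c := by ring
  rw [h1, Int.add_mul_ediv_right _ _ (by omega : c ≠ 0)]
  ring

lemma greedy_replicate {c : Int} (hc : 1 ≤ c) : ∀ (m : Nat) (rest : List Int) (need : Int),
    0 < need →
    greedy (List.replicate m c ++ rest) need
      = min (m : Int) (-(PySem.Int.floordiv (-need) c))
        + greedy rest (need - min (m : Int) (-(PySem.Int.floordiv (-need) c)) * c) := by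
  intro m
  induction m with
  | zero =>
    intro rest need h
    have h1 := ceil_pos hc h
    push_cast
    rw [min_eq_left (by omega : (0:Int) ≤ -(PySem.Int.floordiv (-need) c))]
    simp
  | succ m ih =>
    intro rest need h
    rw [List.replicate_succ, List.cons_append]
    show (if need ≤ 0 then 0 else 1 + greedy (List.replicate m c ++ rest) (need - c)) = _
    rw [if_neg (by omega)]
    by_cases h2 : 0 < need - c
    · rw [ih rest (need - c) h2]
      have hKs := ceil_succ hc need
      have hmin : min ((m : Int) + 1) (-(PySem.Int.floordiv (-need) c))
          = min (m : Int) (-(PySem.Int.floordiv (-(need - c)) c)) + 1 := by omega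
      push_cast
      rw [hmin, show need - (min (m : Int) (-(PySem.Int.floordiv (-(need - c)) c)) + 1) * c
            = need - c - min (m : Int) (-(PySem.Int.floordiv (-(need - c)) c)) * c by ring]
      ring
    · have hK := ceil_eq_one hc h (by omega)
      rw [hK, greedy_nonpos _ _ (by omega : need - c ≤ 0)]
      have hmin : min ((m : Int) + 1) 1 = 1 := by omega
      push_cast
      rw [hmin, greedy_nonpos rest _ (by omega : need - 1 * c ≤ 0)]
      ring

lemma sweep_eq (bucket : List Int) : ∀ (cs : List Int),
    (∀ c ∈ cs, 1 ≤ c ∧ 0 ≤ PySem.List.pyGetD bucket c 0) → ∀ (need res : Int),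
    sweep bucket cs need res
      = res + greedy (cs.flatMap (fun c => List.replicate (PySem.List.pyGetD bucket c 0).toNat c)) need := by
  intro cs
  induction cs with
  | nil => intro _ need res; simp [sweep, greedy]
  | cons c cs ih =>
    intro h need res
    obtain ⟨hc1, hc0⟩ := h c List.mem_cons_self
    by_cases hn : need ≤ 0
    · rw [List.flatMap_cons]
      show (if need ≤ 0 then res else _) = _
      rw [if_pos hn, greedy_nonpos _ _ hn]
      ring
    · show (if need ≤ 0 then res else _) = _
      rw [if_neg hn]
      rw [ih (fun d hd => h d (List.mem_cons_of_mem _ hd))]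
      rw [List.flatMap_cons,
        greedy_replicate hc1 (PySem.List.pyGetD bucket c 0).toNat _ need (by omega),
        Int.toNat_of_nonneg hc0]
      ring

lemma pyGetD_replicate_zero (m : Nat) (i : Int) :
    PySem.List.pyGetD (List.replicate m (0 : Int)) i 0 = 0 := by
  rcases h : PySem.List.pyGet? (List.replicate m (0 : Int)) i with _ | a
  · simp [PySem.List.pyGetD, h]
  · have := PySem.List.mem_of_pyGet?_eq_some (List.replicate m (0 : Int)) h
    simp [PySem.List.pyGetD, h, List.eq_of_mem_replicate this]

lemma bucket_spec : ∀ (l : List Int) (b : List Int),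
    (∀ v ∈ l, 0 ≤ v ∧ v.toNat < b.length) → ∀ c : Int, 0 ≤ c →
    PySem.List.pyGetD
        (l.foldl (fun b v => PySem.List.pySetD b v (PySem.List.pyGetD b v 0 + 1)) b) c 0
      = PySem.List.pyGetD b c 0 + l.count c := by
  intro l
  induction l with
  | nil => intro b _ c _; simp
  | cons v l ih =>
    intro b hmem c hc
    obtain ⟨hv0, hvlen⟩ := hmem v List.mem_cons_self
    rw [List.foldl_cons]
    rw [ih _ (by
      intro w hw
      obtain ⟨h1, h2⟩ := hmem w (List.mem_cons_of_mem _ hw)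
      exact ⟨h1, by rw [PySem.List.length_pySetD]; exact h2⟩) c hc]
    have hvc : v = ((v.toNat : Nat) : Int) := (Int.toNat_of_nonneg hv0).symm
    have hcc : c = ((c.toNat : Nat) : Int) := (Int.toNat_of_nonneg hc).symm
    rw [hvc, hcc, PySem.List.pyGetD_pySetD_natCast b v.toNat c.toNat _ 0 hvlen]
    rw [List.count_cons]
    by_cases hcv : c.toNat = v.toNat
    · rw [if_pos hcv, hcv]
      have hb : (((v.toNat : Int)) == ((v.toNat : Int))) = true := by simp
      rw [hb]
      simp
      omega
    · rw [if_neg hcv]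
      have hb : (((v.toNat : Int)) == ((c.toNat : Int))) = false := by simp; omega
      rw [hb]
      simp

lemma expand_filterMap (g : Int → Nat) : ∀ cs : List Int,
    expandHeap (cs.filterMap (fun c => if 0 < g c then some ((-c : Int), (g c : Int)) else none))
      = cs.flatMap (fun c => List.replicate (g c) c) := by
  intro cs
  induction cs with
  | nil => rfl
  | cons c cs ih =>
    rw [List.filterMap_cons, List.flatMap_cons]
    by_cases hg : 0 < g c
    · rw [if_pos hg]
      simp only [expandHeap, List.flatMap_cons, Int.toNat_natCast, neg_neg] at ih ⊢
      rw [ih]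
    · rw [if_neg hg]
      have : g c = 0 := by omega
      rw [ih, this, List.replicate_zero, List.nil_append]

lemma flatMap_congr_mem {α β : Type} (l : List α) (f g : α → List β)
    (h : ∀ x ∈ l, f x = g x) : l.flatMap f = l.flatMap g := by
  induction l with
  | nil => rfl
  | cons x t ih =>
    simp only [List.flatMap_cons, h x (List.mem_cons_self), ih (fun y hy => h y (List.mem_cons_of_mem _ hy))]

theorem minSetSize_eq_alt (arr : List Int) : minSetSize arr = minSetSize_alt arr := by
  classical
  set n := arr.length with hn
  set vals := (PySem.Dict.counter arr).values with hvals0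
  have hvals : vals = (PySem.Set.ofList arr : List Int).map (fun k => ((arr.count k : Int))) := by
    show (PySem.Dict.counter arr).items.map (·.2) = _
    rw [PySem.Dict.items_counter]
    simp [List.map_map, Function.comp]
  have hvmem : ∀ v ∈ vals, 1 ≤ v ∧ v ≤ (n : Int) := by
    intro v hv
    rw [hvals] at hv
    obtain ⟨k, hk, rfl⟩ := List.mem_map.mp hv
    have hk' : k ∈ arr := (PySem.Set.mem_ofList arr k).mp hk
    have h1 : 0 < arr.count k := List.count_pos_iff.mpr hk'
    have h2 : arr.count k ≤ n := List.count_le_length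
    omega
  set freqD := (PySem.Dict.counter arr).items.foldl (fun d kv => d.modify kv.2 0 (· + 1))
      (PySem.Dict.empty : PySem.Dict Int Int) with hfreq0
  have hfold : freqD = vals.foldl (fun d x => d.modify x 0 (· + 1)) PySem.Dict.empty := by
    rw [hvals0]
    show _ = ((PySem.Dict.counter arr).items.map (·.2)).foldl _ _
    rw [List.foldl_map]
  have hgetD : ∀ c : Int, freqD.getD c 0 = (vals.count c : Int) := by
    intro c
    rw [hfold, PySem.Dict.getD_foldl_modify_add_one]
    show (0 : Int) + _ = _
    ring
  have hkeys : freqD.keys = PySem.Set.ofList vals := by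
    rw [hfold]
    have := PySem.Dict.keys_foldl_modify_key (κ := Int) (ν := Int) vals (fun x => x) 0
      (fun _ _ => (· + 1)) PySem.Dict.empty
    simp only [List.map_id'] at this
    rw [this, PySem.Dict.keys_empty, PySem.Set.update_nil_left]
  have hnodupk : freqD.keys.Nodup := by
    rw [hkeys]; exact PySem.Set.nodup_ofList vals
  have hitems : freqD.items
      = (PySem.Set.ofList vals : List Int).map (fun k => (k, (vals.count k : Int))) := by
    rw [PySem.Dict.items_eq_map_keys freqD hnodupk 0, hkeys]
    exact List.map_congr_left (fun k _ => by rw [hgetD])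
  -- the heap built by the pushes is the sorted pair list
  set pairs0 := freqD.items.map (fun kv => ((-kv.1 : Int), kv.2)) with hpairs0
  set heap0 := freqD.items.foldl (fun h kv => heappush h (-kv.1, kv.2)) ([] : List (Int × Int))
    with hheap0
  have hheap : heap0 = PySem.List.sorted pairs0 pairKey := by
    rw [PySem.List.sorted_eq_foldl_insertBy, hpairs0, List.foldl_map]
    rfl
  set cnt : Int → Nat := fun c => vals.count c with hcnt
  set pairsB := (PySem.List.pyRange (n : Int) 0 (-1)).filterMap
      (fun c => if 0 < cnt c then some ((-c : Int), (cnt c : Int)) else none) with hpairsB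
  have hpw : pairsB.Pairwise (fun a b => pairKey a < pairKey b) := by
    rw [hpairsB, List.pairwise_filterMap]
    have hr : (PySem.List.pyRange (n : Int) 0 (-1)).Pairwise (fun x y => y < x) := by
      rw [PySem.List.pyRange_neg_one]
      refine List.pairwise_map.mpr (List.pairwise_lt_range.imp ?_)
      intro i j hij
      omega
    refine hr.imp ?_
    intro a a' haa b hb b' hb'
    by_cases hga : 0 < cnt a
    · rw [if_pos hga] at hb
      by_cases hga' : 0 < cnt a'
      · rw [if_pos hga'] at hb'
        cases hb; cases hb'
        exact Prod.Lex.toLex_lt_toLex.mpr (Or.inl (by omega))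
      · rw [if_neg hga'] at hb'; cases hb'
    · rw [if_neg hga] at hb; cases hb
  have hnd0 : pairs0.Nodup := by
    rw [hpairs0, hitems, List.map_map]
    refine (PySem.Set.nodup_ofList vals).map ?_
    intro x y hxy
    have h1 : (-x : Int) = -y := congrArg Prod.fst hxy
    omega
  have hndB : pairsB.Nodup := by
    refine hpw.imp ?_
    intro a b hab heq
    rw [heq] at hab
    exact lt_irrefl _ hab
  have hperm : pairsB.Perm pairs0 := by
    rw [List.perm_ext_iff_of_nodup hndB hnd0]
    intro x
    constructor
    · intro hx
      rw [hpairsB] at hx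
      obtain ⟨c, hcr, hsome⟩ := List.mem_filterMap.mp hx
      by_cases hg : 0 < cnt c
      · rw [if_pos hg] at hsome
        cases hsome
        have hcv : c ∈ vals := List.count_pos_iff.mp hg
        rw [hpairs0, hitems, List.map_map]
        exact List.mem_map.mpr ⟨c, (PySem.Set.mem_ofList vals c).mpr hcv, rfl⟩
      · rw [if_neg hg] at hsome; cases hsome
    · intro hx
      rw [hpairs0, hitems, List.map_map] at hx
      obtain ⟨k, hk, rfl⟩ := List.mem_map.mp hx
      have hkv : k ∈ vals := (PySem.Set.mem_ofList vals k).mp hk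
      obtain ⟨h1, h2⟩ := hvmem k hkv
      have hg : 0 < cnt k := List.count_pos_iff.mpr hkv
      rw [hpairsB]
      refine List.mem_filterMap.mpr ⟨k, ?_, ?_⟩
      · exact PySem.List.mem_pyRange_neg_one.mpr ⟨by omega, by omega⟩
      · rw [if_pos hg]
        rfl
  have hsorted : heap0 = pairsB := by
    rw [hheap]
    exact PySem.List.sorted_eq_of_perm_of_pairwise_lt pairs0 pairsB pairKey hperm hpw
  -- bucket contents
  set bucketL := vals.foldl (fun b v => PySem.List.pySetD b v (PySem.List.pyGetD b v 0 + 1))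
      (List.replicate (n + 1) (0 : Int)) with hbucketL
  have hbget : ∀ c : Int, 0 ≤ c → PySem.List.pyGetD bucketL c 0 = (cnt c : Int) := by
    intro c hc
    rw [hbucketL, bucket_spec vals _
        (by
          intro v hv
          obtain ⟨h1, h2⟩ := hvmem v hv
          constructor
          · omega
          · rw [List.length_replicate]; omega) c hc,
      pyGetD_replicate_zero]
    simp [hcnt]
  -- put the two sides together
  show loopA (totalMult heap0 + 1) heap0 freqD (PySem.Int.floordiv (n : Int) 2) 0
      = sweep bucketL (PySem.List.pyRange (n : Int) 0 (-1)) (PySem.Int.floordiv (n : Int) 2) 0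
  rw [loopA_eq (totalMult heap0 + 1) heap0 freqD _ 0
      (by
        intro p hp
        rw [hsorted, hpairsB] at hp
        obtain ⟨c, _, hsome⟩ := List.mem_filterMap.mp hp
        by_cases hg : 0 < cnt c
        · rw [if_pos hg] at hsome
          cases hsome
          simp
          omega
        · rw [if_neg hg] at hsome
          cases hsome)
      (by omega)]
  rw [sweep_eq bucketL (PySem.List.pyRange (n : Int) 0 (-1))
      (by
        intro c hc
        have hcr := (PySem.List.mem_pyRange_neg_one (a := (n : Int)) (b := 0)).mp hc
        exact ⟨by omega, by rw [hbget c (by omega)]; positivity⟩)]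
  rw [hsorted]
  congr 1
  rw [expand_filterMap cnt]
  congr 1
  apply flatMap_congr_mem
  intro c hc
  have hcr := (PySem.List.mem_pyRange_neg_one (a := (n : Int)) (b := 0)).mp hc
  rw [hbget c (by omega), Int.toNat_natCast]

-- ===== VERDICT (by name: the statement is the Claim_ definition above) =====
theorem minSetSize_spec : Claim_equal_minSetSize := by
  intro arr _
  unfold Spec_minSetSize
  exact minSetSize_eq_alt arr
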